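-- pv_equiv track=rewrite | github.com/Tawana2000/Python | Python Intermediate Challenges/vertical-cubes.py | pile_up_cubes
-- ===== SOURCE A (Python) =====
-- def pile_up_cubes(cubes):
--
--     if not cubes:
--         return 'Yes'
--
--     max_cube = max(cubes)
--     max_index = cubes.index(max_cube)
--
--     for i in range(max_index):
--         if cubes[i] < cubes[i + 1]:
--             return 'No'
--
--     for i in range(max_index, len(cubes) - 1):
--         if cubes[i] < cubes[i + 1]:
--             return 'No'
--
--     return 'Yes'
-- ===== SOURCE B (Python) =====
-- def pile_up_cubes(cubes):
--     return 'Yes' if list(cubes) == sorted(cubes, reverse=True) else 'No'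
-- ===== Notes on version B (the rewrite author's own statement) =====
-- stated objective: simpler
-- what changed: A's adjacency scan split around the max index is replaced by a one-line sort-then-compare: the pile is valid iff the list equals its descending-sorted copy.
import Mathlib
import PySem

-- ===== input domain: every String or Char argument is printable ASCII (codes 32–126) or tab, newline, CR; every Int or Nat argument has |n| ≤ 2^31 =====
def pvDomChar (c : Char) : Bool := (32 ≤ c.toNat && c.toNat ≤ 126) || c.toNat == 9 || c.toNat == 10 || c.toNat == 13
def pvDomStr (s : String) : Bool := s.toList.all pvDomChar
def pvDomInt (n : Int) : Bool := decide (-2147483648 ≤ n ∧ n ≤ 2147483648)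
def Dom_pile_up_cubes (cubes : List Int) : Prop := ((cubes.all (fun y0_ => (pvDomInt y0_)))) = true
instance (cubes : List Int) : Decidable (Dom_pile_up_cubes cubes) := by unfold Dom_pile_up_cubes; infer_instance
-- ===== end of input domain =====

-- B replaces A's two adjacency-scan loops with a sort-then-compare one-liner (objective: simpler).

-- ===== PORT A =====
-- helper: one of A's 'for i in range(...)' loops; i runs over the given index list,
-- and the loop 'returns No' (here: false) as soon as cubes[i] < cubes[i+1]
def pvNoRise (cubes : List Int) (is : List Int) : Bool :=
  is.all (fun i => !(decide (PySem.List.pyGetD cubes i 0 < PySem.List.pyGetD cubes (i + 1) 0)))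

def pile_up_cubes (cubes : List Int) : String :=
  if cubes = [] then "Yes"
  else
    match PySem.List.max? cubes (fun x => x) with
    | none => "Yes"   -- unreachable: cubes is nonempty
    | some max_cube =>
      match PySem.List.index? cubes max_cube with
      | none => "Yes" -- unreachable: max_cube ∈ cubes
      | some max_index =>
        if pvNoRise cubes (PySem.List.pyRange 0 (max_index : Int) 1) then
          if pvNoRise cubes (PySem.List.pyRange (max_index : Int) ((cubes.length : Int) - 1) 1) then
            "Yes"
          else "No"
        else "No"

-- ===== PORT B =====
def pile_up_cubes_alt (cubes : List Int) : String :=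
  if cubes = PySem.List.sorted cubes (fun x => x) true then "Yes" else "No"

-- ===== PRECONDITION & SPEC =====
def Spec_pile_up_cubes (cubes : List Int) (out : String) : Prop := out = pile_up_cubes_alt cubes
instance (cubes : List Int) (out : String) : Decidable (Spec_pile_up_cubes cubes out) := by unfold Spec_pile_up_cubes; infer_instance

-- ===== CLAIM (what is proved, stated in full; the proofs are below) =====
def Claim_equal_pile_up_cubes : Prop := ∀ (cubes : List Int), Dom_pile_up_cubes cubes → Spec_pile_up_cubes cubes (pile_up_cubes cubes)

-- ===== LEMMAS AND PROOFS =====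

-- pvNoRise over an in-bounds range says exactly "no adjacent rise on that range"
lemma pvNoRise_iff (cubes : List Int) (a b : Int) (ha : 0 ≤ a) (hb : b < (cubes.length : Int)) :
    pvNoRise cubes (PySem.List.pyRange a b 1) = true ↔
      ∀ i : Nat, a ≤ (i : Int) → (i : Int) < b → ∀ (h : i + 1 < cubes.length),
        ¬ (cubes[i] < cubes[i + 1]) := by
  unfold pvNoRise
  rw [List.all_eq_true]
  constructor
  · intro h i hia hib hlen
    have hmem : (i : Int) ∈ PySem.List.pyRange a b 1 := by
      rw [PySem.List.mem_pyRange_one]; exact ⟨hia, hib⟩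
    have hh := h (i : Int) hmem
    simp only [Bool.not_eq_eq_eq_not, Bool.not_true, decide_eq_false_iff_not] at hh
    rw [PySem.List.pyGetD_eq_getElem cubes (i := (i : Int)) 0 (by omega) (by omega),
        PySem.List.pyGetD_eq_getElem cubes (i := (i : Int) + 1) 0 (by omega) (by omega)] at hh
    have e1 : ((i : Int)).toNat = i := by omega
    have e2 : ((i : Int) + 1).toNat = i + 1 := by omega
    simp only [e1, e2] at hh
    exact hh
  · intro h i hi
    rw [PySem.List.mem_pyRange_one] at hi
    obtain ⟨h1, h2⟩ := hi
    have hi0 : 0 ≤ i := le_trans ha h1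
    have hlen : i.toNat + 1 < cubes.length := by omega
    have hh := h i.toNat (by omega) (by omega) hlen
    simp only [Bool.not_eq_eq_eq_not, Bool.not_true, decide_eq_false_iff_not]
    rw [PySem.List.pyGetD_eq_getElem cubes (i := i) 0 hi0 (by omega),
        PySem.List.pyGetD_eq_getElem cubes (i := i + 1) 0 (by omega) (by omega)]
    have e2 : (i + 1).toNat = i.toNat + 1 := by omega
    simp only [e2]
    exact hh

-- the non-increasing condition characterises equality with the descending sort
lemma sorted_rev_eq_iff (cubes : List Int) :
    cubes = PySem.List.sorted cubes (fun x => x) true ↔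
      List.Pairwise (fun a b => b ≤ a) cubes := by
  constructor
  · intro h
    have hp := PySem.List.sorted_pairwise_rev (xs := cubes) (key := fun x => x)
    rw [← h] at hp
    simpa using hp
  · intro h
    exact (PySem.List.sorted_rev_eq_self_of_pairwise cubes (fun x => x) h).symm

lemma pairwise_iff_adjacent (cubes : List Int) :
    List.Pairwise (fun a b : Int => b ≤ a) cubes ↔
      ∀ i : Nat, ∀ (h : i + 1 < cubes.length), ¬ (cubes[i] < cubes[i + 1]) := by
  rw [List.pairwise_iff_getElem]
  constructor
  · intro h i hlen
    have := h i (i + 1) (by omega) hlen (by omega)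
    omega
  · intro h
    have key : ∀ (d i : Nat) (hd : i + d < cubes.length),
        cubes[i + d]'hd ≤ cubes[i]'(by omega) := by
      intro d
      induction d with
      | zero => intro i hd; simp
      | succ n ih =>
        intro i hd
        have h1 := h (i + n) (by omega)
        have h2 := ih i (by omega)
        have e : i + (n + 1) = (i + n) + 1 := by omega
        calc cubes[i + (n + 1)]'hd = cubes[(i + n) + 1]'(by omega) := by simp only [e]
          _ ≤ cubes[i + n]'(by omega) := by omega
          _ ≤ cubes[i]'(by omega) := h2
    intro i j hi hj hij
    have hk := key (j - i) i (by omega)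
    have e : i + (j - i) = j := by omega
    simp only [e] at hk
    exact hk

-- ===== VERDICT (by name: the statement is the Claim_ definition above) =====
theorem pile_up_cubes_spec : Claim_equal_pile_up_cubes := by
  intro cubes _
  unfold Spec_pile_up_cubes pile_up_cubes pile_up_cubes_alt
  by_cases hnil : cubes = []
  · subst hnil; simp [PySem.List.sorted]
  · rw [if_neg hnil]
    obtain ⟨m, hm⟩ : ∃ m, PySem.List.max? cubes (fun x => x) = some m := by
      cases hmax : PySem.List.max? cubes (fun x => x) with
      | none => exact absurd ((PySem.List.max?_eq_none_iff cubes _).mp hmax) hnil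
      | some m => exact ⟨m, rfl⟩
    have hmem : m ∈ cubes := PySem.List.max?_mem hm
    obtain ⟨k, hk⟩ : ∃ k, PySem.List.index? cubes m = some k := by
      cases hidx : PySem.List.index? cubes m with
      | none => exact absurd hmem ((PySem.List.index?_eq_none_iff cubes m).mp hidx)
      | some k => exact ⟨k, rfl⟩
    simp only [hm, hk]
    obtain ⟨hklt, -, -⟩ := PySem.List.getElem_of_index?_eq_some hk
    have hcond :
        (pvNoRise cubes (PySem.List.pyRange 0 (k : Int) 1) = true ∧
         pvNoRise cubes (PySem.List.pyRange (k : Int) ((cubes.length : Int) - 1) 1) = true) ↔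
        cubes = PySem.List.sorted cubes (fun x => x) true := by
      rw [sorted_rev_eq_iff, pairwise_iff_adjacent,
          pvNoRise_iff cubes 0 (k : Int) le_rfl (by omega),
          pvNoRise_iff cubes (k : Int) ((cubes.length : Int) - 1) (by omega) (by omega)]
      constructor
      · rintro ⟨h1, h2⟩ i hlen
        by_cases hik : (i : Int) < (k : Int)
        · exact h1 i (by omega) hik hlen
        · exact h2 i (by omega) (by omega) hlen
      · intro h
        exact ⟨fun i _ _ hl => h i hl, fun i _ _ hl => h i hl⟩
    by_cases h1 : pvNoRise cubes (PySem.List.pyRange 0 (k : Int) 1) = true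
    · by_cases h2 : pvNoRise cubes (PySem.List.pyRange (k : Int) ((cubes.length : Int) - 1) 1) = true
      · rw [if_pos h1, if_pos h2, if_pos (hcond.mp ⟨h1, h2⟩)]
      · rw [if_pos h1, if_neg h2, if_neg (fun hc => h2 (hcond.mpr hc).2)]
    · rw [if_neg h1, if_neg (fun hc => h1 (hcond.mpr hc).1)]
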